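-- pv_equiv track=rewrite | github.com/LF-Rodriguez/k-Padre | protocols/kPadre_oneGenome.py | createChromopedia
-- ===== SOURCE A (Python) =====
-- def createChromopedia(all_snps, volume_sizes, nVol, margin = 50):
-- 	'Uses the information from indexSNP_table to create'
-- 	'an "enciclopedia" of SNPs, consisitng of multiple'
-- 	'dictionaries with chr, pos and alleles divided by '
-- 	'"Volumes" default to in volume every 1Mbp'
-- 	''
-- 	'chromopedia:['
-- 	'	chr 1_0 <- {0010 : ["T","G"]}'
-- 	'	chr 1_1 <- {1025 : ["A","G"], 1045 : ["T","A"]}'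
-- 	'	chr 1_2 <- {2021 : ["A","G"], 2021 : ["T","A"]}'
--
-- 	chromopedia = {}
-- 	cut = 0
-- 	for vol in list(volume_sizes.keys()):
-- 		name   = str(vol)
-- 		size   = volume_sizes[vol]
-- 		bottom = cut
-- 		top    = (cut + size + margin) if cut == 0 else (cut + size + (2*margin))
-- 		SNPset = all_snps[bottom:top]
--
-- 		# Update cutting position
-- 		cut = top - (2 * margin)
--
-- 		# Create volume
-- 		chromopedia[name] = {}
--
-- 		# Feed volume with SNPs
-- 		for snp in SNPset:
-- 			pos = snp[1]
-- 			G1  = snp[2]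
-- 			G2  = snp[3]
-- 			chromopedia[name][pos] = [G1, G2]
--
-- 	return (chromopedia)
-- ===== SOURCE B (Python) =====
-- from itertools import accumulate
--
-- def createChromopedia(all_snps, volume_sizes, nVol, margin=50):
--     cuts = list(accumulate(volume_sizes.values(),
--                            lambda c, s: c + s - margin if c == 0 else c + s,
--                            initial=0))
--     return {str(name): {snp[1]: [snp[2], snp[3]] for snp in all_snps[b: t + 2 * margin]}
--             for name, b, t in zip(volume_sizes, cuts, cuts[1:])}
-- ===== Notes on version B (the rewrite author's own statement) =====
-- stated objective: simpler
-- what changed: B replaces A's imperative loop that threads a running cut accumulator and mutates nested dicts by a precomputed accumulate-scan of all cut points plus a single dict comprehension over consecutive cut pairs (slice bounds read off zip(cuts, cuts[1:])).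
import Mathlib
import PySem

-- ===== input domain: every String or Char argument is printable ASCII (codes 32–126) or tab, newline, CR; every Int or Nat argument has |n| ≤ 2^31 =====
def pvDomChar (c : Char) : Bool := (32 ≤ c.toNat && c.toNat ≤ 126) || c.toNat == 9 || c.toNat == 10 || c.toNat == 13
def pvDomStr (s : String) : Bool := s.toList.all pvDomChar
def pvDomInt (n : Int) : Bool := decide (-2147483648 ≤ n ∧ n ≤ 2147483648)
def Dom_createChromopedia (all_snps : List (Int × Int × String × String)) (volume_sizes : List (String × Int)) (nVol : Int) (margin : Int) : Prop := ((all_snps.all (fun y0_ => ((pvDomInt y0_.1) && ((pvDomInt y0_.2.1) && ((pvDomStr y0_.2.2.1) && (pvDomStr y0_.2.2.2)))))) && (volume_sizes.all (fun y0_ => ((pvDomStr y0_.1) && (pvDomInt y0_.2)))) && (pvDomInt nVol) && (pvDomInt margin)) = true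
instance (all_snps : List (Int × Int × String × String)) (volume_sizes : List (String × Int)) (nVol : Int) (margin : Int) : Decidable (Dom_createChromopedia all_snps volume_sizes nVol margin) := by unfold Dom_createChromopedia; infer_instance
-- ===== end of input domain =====

-- B replaces A's imperative loop (threaded cut accumulator + nested mutable dict updates) by a
-- precomputed accumulate-scan of all cut points and a single dict comprehension over consecutive
-- cut pairs; objective: simpler.

-- ===== PORT A =====
-- volume_sizes arrives as a Python dict: built with PySem.Dict.ofList (insertion order, last value wins).
-- 'volume_sizes[vol]' and 'chromopedia[name][pos] = …' are ported with getD/modify; the keys are always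
-- present there, so this is exact.  str(vol) of a str is the string itself.
def createChromopedia (all_snps : List (Int × Int × String × String)) (volume_sizes : List (String × Int)) (nVol : Int) (margin : Int) : List (String × List (Int × List String)) :=
  let d := PySem.Dict.ofList volume_sizes
  let res := d.keys.foldl (fun (st : PySem.Dict String (PySem.Dict Int (List String)) × Int) vol =>
      let chromopedia := st.1
      let cut := st.2
      let name := vol
      let size := d.getD vol 0
      let bottom := cut
      let top := if cut = 0 then cut + size + margin else cut + size + (2*margin)
      let SNPset := PySem.List.slice all_snps (some bottom) (some top)
      let cut' := top - (2*margin)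
      let chromopedia := chromopedia.insert name PySem.Dict.empty
      let chromopedia := SNPset.foldl (fun ch snp =>
          ch.modify name PySem.Dict.empty (fun inn => inn.insert snp.2.1 [snp.2.2.1, snp.2.2.2])) chromopedia
      (chromopedia, cut'))
    (PySem.Dict.empty, 0)
  res.1.items.map (fun p => (p.1, p.2.items))

-- ===== PORT B =====
-- port of itertools.accumulate(sizes, lambda c, s: c + s - margin if c == 0 else c + s, initial=c)
def pvCuts (margin : Int) : Int → List Int → List Int
  | c, [] => [c]
  | c, s :: t => c :: pvCuts margin (if c = 0 then c + s - margin else c + s) t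

def createChromopedia_alt (all_snps : List (Int × Int × String × String)) (volume_sizes : List (String × Int)) (nVol : Int) (margin : Int) : List (String × List (Int × List String)) :=
  let d := PySem.Dict.ofList volume_sizes
  let cuts := pvCuts margin 0 d.values
  (d.keys.zip (cuts.zip (PySem.List.slice cuts (some 1) none))).map (fun nbt =>
    (nbt.1, (PySem.Dict.ofList ((PySem.List.slice all_snps (some nbt.2.1) (some (nbt.2.2 + 2*margin))).map
        (fun snp => (snp.2.1, [snp.2.2.1, snp.2.2.2])))).items))

-- ===== PRECONDITION & SPEC =====
def Spec_createChromopedia (all_snps : List (Int × Int × String × String)) (volume_sizes : List (String × Int)) (nVol : Int) (margin : Int) (out : List (String × List (Int × List String))) : Prop := out = createChromopedia_alt all_snps volume_sizes nVol margin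
instance (all_snps : List (Int × Int × String × String)) (volume_sizes : List (String × Int)) (nVol : Int) (margin : Int) (out : List (String × List (Int × List String))) : Decidable (Spec_createChromopedia all_snps volume_sizes nVol margin out) := by unfold Spec_createChromopedia; infer_instance

-- ===== CLAIM (what is proved, stated in full; the proofs are below) =====
def Claim_equal_createChromopedia : Prop := ∀ (all_snps : List (Int × Int × String × String)) (volume_sizes : List (String × Int)) (nVol : Int) (margin : Int), Dom_createChromopedia all_snps volume_sizes nVol margin → Spec_createChromopedia all_snps volume_sizes nVol margin (createChromopedia all_snps volume_sizes nVol margin)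

-- ===== LEMMAS AND PROOFS =====

-- the inner per-volume dictionary both programs build from a slice of SNPs
def pvInner (snps : List (Int × Int × String × String)) : PySem.Dict Int (List String) :=
  snps.foldl (fun inn snp => inn.insert snp.2.1 [snp.2.2.1, snp.2.2.2]) PySem.Dict.empty

-- A's loop, after the dict bookkeeping is resolved (proved below in pvA_fold)
def pvRunA (all_snps : List (Int × Int × String × String)) (margin : Int) :
    List (String × Int) → PySem.Dict String (PySem.Dict Int (List String)) → Int →
    PySem.Dict String (PySem.Dict Int (List String))
  | [], ch, _ => ch
  | (k, s) :: t, ch, c =>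
      let top := if c = 0 then c + s + margin else c + s + 2*margin
      pvRunA all_snps margin t
        (ch.insert k (pvInner (PySem.List.slice all_snps (some c) (some top)))) (top - 2*margin)

-- B's comprehension, as a recursion on (remaining volumes, current cut)
def pvDefB (all_snps : List (Int × Int × String × String)) (margin : Int) :
    List (String × Int) → Int → List (String × List (Int × List String))
  | [], _ => []
  | (k, s) :: t, c =>
      (k, (pvInner (PySem.List.slice all_snps (some c)
            (some ((if c = 0 then c + s - margin else c + s) + 2*margin)))).items)
        :: pvDefB all_snps margin t (if c = 0 then c + s - margin else c + s)

lemma pv_modify_insert_self {ν : Type} (d : PySem.Dict String ν) (k : String) (v : ν) (d0 : ν) (f : ν → ν) :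
    (d.insert k v).modify k d0 f = d.insert k (f v) := by
  simp [PySem.Dict.modify, PySem.Dict.getD_insert_self, PySem.Dict.insert_insert_self]

lemma pv_foldl_modify_const_key {α ν : Type} (l : List α) (d : PySem.Dict String ν) (k : String)
    (d0 : ν) (g : α → ν → ν) (v : ν) :
    l.foldl (fun ch x => ch.modify k d0 (g x)) (d.insert k v)
      = d.insert k (l.foldl (fun v x => g x v) v) := by
  induction l generalizing v with
  | nil => rfl
  | cons a t ih => simp only [List.foldl_cons, pv_modify_insert_self, ih]

-- B's inner dict comprehension is pvInner
lemma pv_ofList_map_eq_inner (snps : List (Int × Int × String × String)) :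
    PySem.Dict.ofList (snps.map (fun snp => (snp.2.1, [snp.2.2.1, snp.2.2.2]))) = pvInner snps := by
  simp [PySem.Dict.ofList, PySem.Dict.update, List.foldl_map, pvInner]

-- A's foldl over the dict's keys is pvRunA over its items
lemma pvA_fold (all_snps : List (Int × Int × String × String)) (margin : Int)
    (d : PySem.Dict String Int) (l : List (String × Int)) (ch : PySem.Dict String (PySem.Dict Int (List String))) (c : Int)
    (hl : ∀ p ∈ l, d.getD p.1 0 = p.2) :
    ((l.map (fun p => p.1)).foldl (fun (st : PySem.Dict String (PySem.Dict Int (List String)) × Int) vol =>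
      let chromopedia := st.1
      let cut := st.2
      let name := vol
      let size := d.getD vol 0
      let bottom := cut
      let top := if cut = 0 then cut + size + margin else cut + size + (2*margin)
      let SNPset := PySem.List.slice all_snps (some bottom) (some top)
      let cut' := top - (2*margin)
      let chromopedia := chromopedia.insert name PySem.Dict.empty
      let chromopedia := SNPset.foldl (fun ch snp =>
          ch.modify name PySem.Dict.empty (fun inn => inn.insert snp.2.1 [snp.2.2.1, snp.2.2.2])) chromopedia
      (chromopedia, cut')) (ch, c)).1
    = pvRunA all_snps margin l ch c := by
  induction l generalizing ch c with
  | nil => rfl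
  | cons p t ih =>
      obtain ⟨k, s⟩ := p
      have hk : d.getD k 0 = s := hl (k, s) (by simp)
      have ih2 := fun ch c => ih ch c (fun q hq => hl q (List.mem_cons_of_mem _ hq))
      simp only [List.map_cons, List.foldl_cons, hk, pvRunA, pv_foldl_modify_const_key, pvInner] at ih2 ⊢
      exact ih2 _ _

-- A's loop and B's comprehension produce the same volumes from any cut position
lemma pv_run_eq_defB (all_snps : List (Int × Int × String × String)) (margin : Int)
    (t : List (String × Int)) (ch : PySem.Dict String (PySem.Dict Int (List String))) (c : Int)
    (hfresh : ∀ p ∈ t, ch.contains p.1 = false)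
    (hnodup : (t.map (fun p => p.1)).Nodup) :
    (pvRunA all_snps margin t ch c).items.map (fun p => (p.1, p.2.items))
      = ch.items.map (fun p => (p.1, p.2.items)) ++ pvDefB all_snps margin t c := by
  induction t generalizing ch c with
  | nil => simp [pvRunA, pvDefB]
  | cons p t ih =>
      obtain ⟨k, s⟩ := p
      have hkfresh : ch.contains k = false := hfresh (k, s) (by simp)
      have hknotin : k ∉ t.map (fun p => p.1) := by
        have := hnodup; simp only [List.map_cons, List.nodup_cons] at this; exact this.1
      have htop : (if c = 0 then c + s + margin else c + s + 2*margin)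
          = (if c = 0 then c + s - margin else c + s) + 2*margin := by
        split <;> ring
      have hcut : (if c = 0 then c + s - margin else c + s) + 2*margin - 2*margin
          = (if c = 0 then c + s - margin else c + s) := by ring
      simp only [pvRunA, htop, hcut]
      rw [ih (ch.insert k (pvInner (PySem.List.slice all_snps (some c)
            (some ((if c = 0 then c + s - margin else c + s) + 2*margin)))))
          (if c = 0 then c + s - margin else c + s)
        (by
          intro q hq
          have h1 : ch.contains q.1 = false := hfresh q (List.mem_cons_of_mem _ hq)
          have h2 : q.1 ≠ k := by
            intro hqk; exact hknotin (by rw [← hqk]; exact List.mem_map_of_mem hq)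
          simp [PySem.Dict.contains_insert, h1, h2])
        (by simpa using (List.nodup_cons.mp (by simpa using hnodup)).2)]
      rw [PySem.Dict.items_insert_of_not_contains _ _ hkfresh]
      simp [pvDefB]

-- B's zip/map expression is pvDefB
lemma pvB_zip (all_snps : List (Int × Int × String × String)) (margin : Int)
    (l : List (String × Int)) (c : Int) :
    (((l.map (fun p => p.1)).zip ((pvCuts margin c (l.map (fun p => p.2))).zip
        (PySem.List.slice (pvCuts margin c (l.map (fun p => p.2))) (some 1) none))).map (fun nbt =>
      (nbt.1, (PySem.Dict.ofList ((PySem.List.slice all_snps (some nbt.2.1) (some (nbt.2.2 + 2*margin))).map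
          (fun snp => (snp.2.1, [snp.2.2.1, snp.2.2.2])))).items)))
    = pvDefB all_snps margin l c := by
  induction l generalizing c with
  | nil => simp [pvCuts, pvDefB]
  | cons p t ih =>
      obtain ⟨k, s⟩ := p
      cases t with
      | nil => simp [pvCuts, pvDefB, PySem.List.slice_from_one, pv_ofList_map_eq_inner]
      | cons q t' =>
          have ih2 := ih (if c = 0 then c + s - margin else c + s)
          simp only [PySem.List.slice_from_one, pvCuts, List.map_cons, List.tail_cons,
            List.zip_cons_cons, pvDefB, pv_ofList_map_eq_inner] at ih2 ⊢
          exact congrArg _ ih2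

-- ===== VERDICT (by name: the statement is the Claim_ definition above) =====
theorem createChromopedia_spec : Claim_equal_createChromopedia := by
  intro all_snps volume_sizes nVol margin _hdom
  unfold Spec_createChromopedia createChromopedia createChromopedia_alt
  set d := PySem.Dict.ofList volume_sizes with hd
  have hkeys : d.keys = d.items.map (fun p => p.1) := rfl
  have hnodupk : (d.items.map (fun p => p.1)).Nodup := by
    rw [← hkeys]; exact PySem.Dict.nodup_keys_ofList volume_sizes
  have hvals : d.values = d.items.map (fun p => p.2) := rfl
  have hl : ∀ p ∈ d.items, d.getD p.1 0 = p.2 := by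
    intro p hp
    exact PySem.Dict.getD_of_mem_items d (by simpa using hp) (by rw [hkeys]; exact hnodupk) 0
  simp only [hkeys, hvals]
  rw [pvA_fold all_snps margin d d.items PySem.Dict.empty 0 hl]
  rw [pvB_zip all_snps margin d.items 0]
  rw [pv_run_eq_defB all_snps margin d.items PySem.Dict.empty 0
    (fun q _ => PySem.Dict.contains_empty q.1) hnodupk]
  rfl
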